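-- pv_equiv track=rewrite | github.com/mohammadfaiizan/ProjectI | DSA/Dynamic_Programming/005_dp_grid_matrix.py | unique_paths_k_moves
-- ===== SOURCE A (Python) =====
-- def unique_paths_k_moves(m: int, n: int, k: int) -> int:
--     """
--     Count paths with exactly k moves (can move in 4 directions)
--
--     Time Complexity: O(m * n * k)
--     Space Complexity: O(m * n * k)
--
--     Args:
--         m, n: Grid dimensions
--         k: Exact number of moves allowed
--
--     Returns:
--         Number of paths with exactly k moves
--     """
--     # dp[i][j][moves] = ways to reach (i,j) with 'moves' moves
--     dp = [[[0 for _ in range(k + 1)] for _ in range(n)] for _ in range(m)]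
--     dp[0][0][0] = 1  # Start position with 0 moves
--
--     directions = [(0, 1), (1, 0), (0, -1), (-1, 0)]
--
--     for moves in range(1, k + 1):
--         for i in range(m):
--             for j in range(n):
--                 for di, dj in directions:
--                     ni, nj = i + di, j + dj
--                     if 0 <= ni < m and 0 <= nj < n:
--                         dp[i][j][moves] += dp[ni][nj][moves - 1]
--
--     return sum(dp[i][j][k] for i in range(m) for j in range(n))
-- ===== SOURCE B (Python) =====
-- def unique_paths_k_moves(m: int, n: int, k: int) -> int:
--     # Dimension split: a k-step 4-directional walk is an interleaving of a
--     # row-walk and a column-walk; combine two 1-D walk-count DPs with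
--     # binomial coefficients.  O(k*(m+n)) instead of O(m*n*k).
--     def totals(L, t):
--         # totals[s] = number of s-step 1-D walks on {0..L-1} starting at 0
--         cur = [0] * L
--         cur[0] = 1
--         out = [1]
--         for _ in range(t):
--             cur = [(cur[i - 1] if i > 0 else 0) + (cur[i + 1] if i + 1 < L else 0)
--                    for i in range(L)]
--             out.append(sum(cur))
--         return out
--
--     row = totals(m, k)
--     col = totals(n, k)
--     total = 0
--     c = 1  # C(k, a)
--     for a in range(k + 1):
--         total += c * row[a] * col[k - a]
--         c = c * (k - a) // (a + 1)
--     return total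
-- ===== Notes on version B (the rewrite author's own statement) =====
-- stated objective: faster
-- what changed: Replaces the 3-D O(m*n*k) grid DP by a dimension split: two 1-D walk-count DPs (rows and columns) combined by a binomial convolution over how many of the k steps are horizontal.
import Mathlib
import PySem

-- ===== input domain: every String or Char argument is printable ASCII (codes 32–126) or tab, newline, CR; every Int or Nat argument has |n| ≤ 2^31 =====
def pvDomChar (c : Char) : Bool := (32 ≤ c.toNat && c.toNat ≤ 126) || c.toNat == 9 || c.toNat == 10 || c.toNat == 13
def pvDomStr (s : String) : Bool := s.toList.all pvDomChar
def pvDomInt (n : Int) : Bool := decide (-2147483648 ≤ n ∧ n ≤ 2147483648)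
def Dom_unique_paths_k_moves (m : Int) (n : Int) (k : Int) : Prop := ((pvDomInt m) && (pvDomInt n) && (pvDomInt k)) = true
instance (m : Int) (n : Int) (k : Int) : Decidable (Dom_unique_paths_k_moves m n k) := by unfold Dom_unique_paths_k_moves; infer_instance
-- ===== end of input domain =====

-- B replaces the 3-D O(m*n*k) grid DP by two 1-D walk-count DPs combined with a
-- binomial convolution (O(k*(m+n))); measured faster (asymptotic change).


-- ===== PORT A =====
-- directions = [(0, 1), (1, 0), (0, -1), (-1, 0)]
def pvDirs : List (Int × Int) := [(0, 1), (1, 0), (0, -1), (-1, 0)]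

-- dp[i][j][t] (read); every use site is index-guarded, so the defaults are never taken
def pvGet3 (dp : List (List (List Int))) (i j t : Int) : Int :=
  PySem.List.pyGetD (PySem.List.pyGetD (PySem.List.pyGetD dp i []) j []) t 0

-- dp[i][j][t] = f(old value); indices at every use site are nonnegative and in range
def pvMod3 (dp : List (List (List Int))) (i j t : Int) (f : Int → Int) : List (List (List Int)) :=
  dp.modify i.toNat (fun row => row.modify j.toNat (fun cell => cell.modify t.toNat f))

-- the inner 'for di, dj in directions' loop body for one cell (i, j) at layer 'moves'
def pvCellStep (m n : Int) (moves i j : Int) (dp : List (List (List Int))) : List (List (List Int)) :=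
  pvDirs.foldl (fun dp d =>
    let ni := i + d.1
    let nj := j + d.2
    if 0 ≤ ni ∧ ni < m ∧ 0 ≤ nj ∧ nj < n then
      pvMod3 dp i j moves (fun x => x + pvGet3 dp ni nj (moves - 1))
    else dp) dp

def unique_paths_k_moves (m : Int) (n : Int) (k : Int) : Int :=
  -- dp = [[[0]*(k+1)]*n]*m  (as list comprehensions)
  let dp0 : List (List (List Int)) :=
    (PySem.List.pyRange 0 m 1).map (fun _ =>
      (PySem.List.pyRange 0 n 1).map (fun _ =>
        (PySem.List.pyRange 0 (k + 1) 1).map (fun _ => (0 : Int))))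
  -- dp[0][0][0] = 1
  let dp1 := pvMod3 dp0 0 0 0 (fun _ => 1)
  -- triple loop over moves, i, j (each cell folds over the four directions)
  let dp := (PySem.List.pyRange 1 (k + 1) 1).foldl (fun dp moves =>
    (PySem.List.pyRange 0 m 1).foldl (fun dp i =>
      (PySem.List.pyRange 0 n 1).foldl (fun dp j =>
        pvCellStep m n moves i j dp) dp) dp) dp1
  -- sum(dp[i][j][k] for i in range(m) for j in range(n))
  (PySem.List.pyRange 0 m 1).foldl (fun s i =>
    (PySem.List.pyRange 0 n 1).foldl (fun s j => s + pvGet3 dp i j k) s) 0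

-- ===== PORT B =====
-- one list-comprehension step of B's 1-D walk DP
def pvStep (L : Int) (cur : List Int) : List Int :=
  (PySem.List.pyRange 0 L 1).map (fun i =>
    (if 0 < i then PySem.List.pyGetD cur (i - 1) 0 else 0) +
    (if i + 1 < L then PySem.List.pyGetD cur (i + 1) 0 else 0))

-- totals(L, t): totals[s] = number of s-step 1-D walks on {0..L-1} starting at 0
def pvTotals (L t : Int) : List Int :=
  let cur0 := (List.replicate L.toNat (0 : Int)).set 0 1   -- cur = [0]*L; cur[0] = 1 (L ≥ 1 under Pre_)
  let st := (PySem.List.pyRange 0 t 1).foldl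
    (fun (st : List Int × List Int) _ =>
      let nxt := pvStep L st.1
      (nxt, st.2 ++ [nxt.sum])) (cur0, [1])
  st.2

def unique_paths_k_moves_alt (m : Int) (n : Int) (k : Int) : Int :=
  let row := pvTotals m k
  let col := pvTotals n k
  let r := (PySem.List.pyRange 0 (k + 1) 1).foldl
    (fun (st : Int × Int) a =>
      (st.1 + st.2 * PySem.List.pyGetD row a 0 * PySem.List.pyGetD col (k - a) 0,
       PySem.Int.floordiv (st.2 * (k - a)) (a + 1))) (0, 1)
  r.1

-- ===== PRECONDITION & SPEC =====
-- A raises IndexError (dp[0][0][0] on an empty list dimension) when m ≤ 0, n ≤ 0 or k < 0.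
def Pre_unique_paths_k_moves (m : Int) (n : Int) (k : Int) : Prop := 1 ≤ m ∧ 1 ≤ n ∧ 0 ≤ k
instance (m : Int) (n : Int) (k : Int) : Decidable (Pre_unique_paths_k_moves m n k) := by
  unfold Pre_unique_paths_k_moves; infer_instance

def pvWitness_unique_paths_k_moves : Int × Int × Int := (2, 3, 4)

def Spec_unique_paths_k_moves (m : Int) (n : Int) (k : Int) (out : Int) : Prop := out = unique_paths_k_moves_alt m n k
instance (m : Int) (n : Int) (k : Int) (out : Int) : Decidable (Spec_unique_paths_k_moves m n k out) := by unfold Spec_unique_paths_k_moves; infer_instance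

-- ===== CLAIM (what is proved, stated in full; the proofs are below) =====
def Claim_equal_unique_paths_k_moves : Prop := ∀ (m : Int) (n : Int) (k : Int), Dom_unique_paths_k_moves m n k → Pre_unique_paths_k_moves m n k → Spec_unique_paths_k_moves m n k (unique_paths_k_moves m n k)

-- ===== LEMMAS AND PROOFS =====

-- f L t i = number of t-step walks on {0..L-1} from 0 to i (0 outside the segment)
def pvF (L : Int) : Nat → Int → Int
  | 0, i => if i = 0 then 1 else 0
  | t + 1, i => if 0 ≤ i ∧ i < L then pvF L t (i - 1) + pvF L t (i + 1) else 0

-- d m n t i j = number of t-step 4-directional walks on the grid from (0,0) to (i,j)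
def pvD2 (m n : Int) : Nat → Int → Int → Int
  | 0, i, j => if i = 0 ∧ j = 0 then 1 else 0
  | t + 1, i, j => if 0 ≤ i ∧ i < m ∧ 0 ≤ j ∧ j < n then
      pvD2 m n t i (j + 1) + pvD2 m n t (i + 1) j + pvD2 m n t i (j - 1) + pvD2 m n t (i - 1) j
    else 0

lemma pvF_outside (L : Int) (hL : 1 ≤ L) (t : Nat) (i : Int) (h : ¬ (0 ≤ i ∧ i < L)) :
    pvF L t i = 0 := by
  cases t with
  | zero => simp only [pvF]; split <;> omega
  | succ t => simp only [pvF]; split <;> [omega; rfl]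

lemma pvF_inside (L : Int) (t : Nat) (i : Int) (h : 0 ≤ i ∧ i < L) :
    pvF L (t + 1) i = pvF L t (i - 1) + pvF L t (i + 1) := by
  simp only [pvF, if_pos h]

lemma pvD2_outside (m n : Int) (hm : 1 ≤ m) (hn : 1 ≤ n) (t : Nat) (i j : Int)
    (h : ¬ (0 ≤ i ∧ i < m ∧ 0 ≤ j ∧ j < n)) : pvD2 m n t i j = 0 := by
  cases t with
  | zero => simp only [pvD2]; split <;> [omega; rfl]
  | succ t => simp only [pvD2]; split <;> [omega; rfl]

lemma pvListSumRange (N : Nat) (f : Nat → Int) :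
    ((List.range N).map f).sum = ∑ x ∈ Finset.range N, f x := by
  induction N with
  | zero => simp
  | succ N ih => simp [List.range_succ, Finset.sum_range_succ, ih]

-- the dimension-split identity: 2-D walk counts are a binomial convolution of 1-D walk counts
lemma pvD2_eq_conv (m n : Int) (hm : 1 ≤ m) (hn : 1 ≤ n) (t : Nat) (i j : Int) :
    pvD2 m n t i j =
      ∑ a ∈ Finset.range (t + 1), ((t.choose a : Int) * pvF m a i * pvF n (t - a) j) := by
  induction t generalizing i j with
  | zero =>
    rw [Finset.sum_range_one]
    simp only [pvD2, pvF, Nat.choose_self, Nat.cast_one, one_mul]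
    split_ifs <;> first | tauto | norm_num
  | succ t ih =>
    by_cases hin : 0 ≤ i ∧ i < m ∧ 0 ≤ j ∧ j < n
    · -- inside the grid
      have hLHS : pvD2 m n (t + 1) i j =
          (∑ a ∈ Finset.range (t + 1),
            ((t.choose a : Int) * pvF m a i * (pvF n (t - a) (j - 1) + pvF n (t - a) (j + 1)))) +
          (∑ a ∈ Finset.range (t + 1),
            ((t.choose a : Int) * (pvF m a (i - 1) + pvF m a (i + 1)) * pvF n (t - a) j)) := by
        simp only [pvD2, if_pos hin]
        rw [ih, ih, ih, ih, ← Finset.sum_add_distrib, ← Finset.sum_add_distrib,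
          ← Finset.sum_add_distrib, ← Finset.sum_add_distrib]
        apply Finset.sum_congr rfl
        intro a _
        ring
      rw [hLHS]
      have hjs : ∀ a ∈ Finset.range (t + 1),
          (t.choose a : Int) * pvF m a i * (pvF n (t - a) (j - 1) + pvF n (t - a) (j + 1)) =
          (t.choose a : Int) * pvF m a i * pvF n (t + 1 - a) j := by
        intro a ha
        rw [Finset.mem_range] at ha
        have h1 : t + 1 - a = (t - a) + 1 := by omega
        rw [h1, pvF_inside n (t - a) j ⟨hin.2.2.1, hin.2.2.2⟩]
      have his : ∀ a ∈ Finset.range (t + 1),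
          (t.choose a : Int) * (pvF m a (i - 1) + pvF m a (i + 1)) * pvF n (t - a) j =
          (t.choose a : Int) * pvF m (a + 1) i * pvF n (t - a) j := by
        intro a _
        rw [pvF_inside m a i ⟨hin.1, hin.2.1⟩]
      rw [Finset.sum_congr rfl hjs, Finset.sum_congr rfl his]
      -- Pascal recurrence, assembled term by term
      have e1 := Finset.sum_range_succ'
        (fun a => (((t + 1).choose a : Int) * pvF m a i * pvF n (t + 1 - a) j)) (t + 1)
      beta_reduce at e1
      have e2 := Finset.sum_range_succ'
        (fun b => ((t.choose b : Int) * pvF m b i * pvF n (t + 1 - b) j)) (t + 1)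
      beta_reduce at e2
      have e3 := Finset.sum_range_succ
        (fun b => ((t.choose b : Int) * pvF m b i * pvF n (t + 1 - b) j)) (t + 1)
      beta_reduce at e3
      rw [e1]
      have hsplit : ∀ x ∈ Finset.range (t + 1),
          (((t + 1).choose (x + 1) : Int) * pvF m (x + 1) i * pvF n (t + 1 - (x + 1)) j) =
          ((t.choose x : Int) * pvF m (x + 1) i * pvF n (t - x) j) +
          ((t.choose (x + 1) : Int) * pvF m (x + 1) i * pvF n (t + 1 - (x + 1)) j) := by
        intro x _
        rw [Nat.choose_succ_succ]
        push_cast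
        ring
      rw [Finset.sum_congr rfl hsplit, Finset.sum_add_distrib]
      have hzero : ((t.choose (t + 1) : Int) * pvF m (t + 1) i * pvF n (t + 1 - (t + 1)) j) = 0 := by
        rw [Nat.choose_eq_zero_of_lt (by omega)]
        push_cast
        ring
      have hfirst : (((t + 1).choose 0 : Int) * pvF m 0 i * pvF n (t + 1 - 0) j) =
          ((t.choose 0 : Int) * pvF m 0 i * pvF n (t + 1 - 0) j) := by
        norm_num
      rw [hfirst]
      linarith [e2, e3, hzero]
    · -- outside the grid: both sides vanish
      rw [pvD2_outside m n hm hn _ i j hin]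
      symm
      apply Finset.sum_eq_zero
      intro a _
      by_cases hx : 0 ≤ i ∧ i < m
      · rw [pvF_outside n hn (t + 1 - a) j (by tauto)]; ring
      · rw [pvF_outside m hm a i hx]; ring

-- ----- bridge to port A -----

def pvGrid (m n k : Int) (g : Int → Int → Int → Int) : List (List (List Int)) :=
  (PySem.List.pyRange 0 m 1).map (fun i =>
    (PySem.List.pyRange 0 n 1).map (fun j =>
      (PySem.List.pyRange 0 (k + 1) 1).map (fun t => g i j t)))

lemma pvGrid_congr (m n k : Int) (g g' : Int → Int → Int → Int)
    (h : ∀ i j t, 0 ≤ i → i < m → 0 ≤ j → j < n → 0 ≤ t → t < k + 1 → g i j t = g' i j t) :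
    pvGrid m n k g = pvGrid m n k g' := by
  unfold pvGrid
  refine List.map_congr_left (fun i hi => ?_)
  rw [PySem.List.mem_pyRange_one] at hi
  refine List.map_congr_left (fun j hj => ?_)
  rw [PySem.List.mem_pyRange_one] at hj
  refine List.map_congr_left (fun t ht => ?_)
  rw [PySem.List.mem_pyRange_one] at ht
  exact h i j t hi.1 hi.2 hj.1 hj.2 ht.1 ht.2

lemma pvGet3_grid (m n k : Int) (g : Int → Int → Int → Int) (i j t : Int)
    (hi : 0 ≤ i) (hi' : i < m) (hj : 0 ≤ j) (hj' : j < n) (ht : 0 ≤ t) (ht' : t < k + 1) :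
    pvGet3 (pvGrid m n k g) i j t = g i j t := by
  unfold pvGet3 pvGrid
  rw [PySem.List.pyGetD_map_pyRange_of_nonneg _ m i _ hi hi',
    PySem.List.pyGetD_map_pyRange_of_nonneg _ n j _ hj hj',
    PySem.List.pyGetD_map_pyRange_of_nonneg _ (k + 1) t _ ht ht']

lemma pvModifyMapPyRange {α : Type} (c : Int) (F : Int → α) (g : α → α) (i : Int)
    (h0 : 0 ≤ i) (h1 : i < c) :
    ((PySem.List.pyRange 0 c 1).map F).modify i.toNat g =
      (PySem.List.pyRange 0 c 1).map (fun x => if x = i then g (F x) else F x) := by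
  apply List.ext_getElem
  · simp [List.length_modify]
  intro p h2 h3
  rw [List.getElem_modify]
  simp only [List.getElem_map, PySem.List.getElem_pyRange_one]
  split_ifs with ha hb hb <;> first | rfl | omega

lemma pvMod3_grid (m n k : Int) (g : Int → Int → Int → Int) (i j t : Int) (f : Int → Int)
    (hi : 0 ≤ i) (hi' : i < m) (hj : 0 ≤ j) (hj' : j < n) (ht : 0 ≤ t) (ht' : t < k + 1) :
    pvMod3 (pvGrid m n k g) i j t f =
      pvGrid m n k (fun i' j' t' => if i' = i ∧ j' = j ∧ t' = t then f (g i j t) else g i' j' t') := by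
  unfold pvMod3 pvGrid
  rw [pvModifyMapPyRange m _ _ i hi hi']
  refine List.map_congr_left (fun i' hi2 => ?_)
  rw [PySem.List.mem_pyRange_one] at hi2
  beta_reduce
  by_cases hii : i' = i
  · rw [if_pos hii, pvModifyMapPyRange n _ _ j hj hj']
    refine List.map_congr_left (fun j' hj2 => ?_)
    rw [PySem.List.mem_pyRange_one] at hj2
    beta_reduce
    by_cases hjj : j' = j
    · rw [if_pos hjj, pvModifyMapPyRange (k + 1) _ _ t ht ht']
      refine List.map_congr_left (fun t' ht2 => ?_)
      rw [PySem.List.mem_pyRange_one] at ht2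
      beta_reduce
      by_cases htt : t' = t
      · rw [if_pos htt, if_pos (show i' = i ∧ j' = j ∧ t' = t from ⟨hii, hjj, htt⟩), hii, hjj, htt]
      · rw [if_neg htt, if_neg (show ¬ (i' = i ∧ j' = j ∧ t' = t) from by tauto), hii, hjj]
    · rw [if_neg hjj]
      refine List.map_congr_left (fun t' ht2 => ?_)
      beta_reduce
      rw [if_neg (show ¬ (i' = i ∧ j' = j ∧ t' = t) from by tauto), hii]
  · rw [if_neg hii]
    refine List.map_congr_left (fun j' hj2 => ?_)
    beta_reduce
    refine List.map_congr_left (fun t' ht2 => ?_)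
    beta_reduce
    rw [if_neg (show ¬ (i' = i ∧ j' = j ∧ t' = t) from by tauto)]

-- one direction of the inner 'for di, dj in directions' loop, on an abstract grid
lemma pvDirStep_grid (m n k : Int) (moves I J di dj : Int) (g : Int → Int → Int → Int)
    (hI : 0 ≤ I) (hI' : I < m) (hJ : 0 ≤ J) (hJ' : J < n) (hmv : 1 ≤ moves) (hmv' : moves ≤ k) :
    (if 0 ≤ I + di ∧ I + di < m ∧ 0 ≤ J + dj ∧ J + dj < n then
        pvMod3 (pvGrid m n k g) I J moves
          (fun x => x + pvGet3 (pvGrid m n k g) (I + di) (J + dj) (moves - 1))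
      else pvGrid m n k g) =
      pvGrid m n k (fun i j t => if i = I ∧ j = J ∧ t = moves then
          g I J moves +
            (if 0 ≤ I + di ∧ I + di < m ∧ 0 ≤ J + dj ∧ J + dj < n then
              g (I + di) (J + dj) (moves - 1) else 0)
        else g i j t) := by
  split_ifs with hc
  · rw [pvGet3_grid m n k g _ _ _ hc.1 hc.2.1 hc.2.2.1 hc.2.2.2 (by omega) (by omega)]
    rw [pvMod3_grid m n k g I J moves _ hI hI' hJ hJ' (by omega) (by omega)]
  · apply pvGrid_congr
    intro i j t _ _ _ _ _ _
    split_ifs with h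
    · rw [h.1, h.2.1, h.2.2]; ring
    · rfl

-- partially processed layer 'moves': cells lexicographically before (I, J) already updated
def pvGP (m n : Int) (moves I J : Int) : Int → Int → Int → Int :=
  fun i j t =>
    if t < moves then pvD2 m n t.toNat i j
    else if t = moves ∧ (i < I ∨ (i = I ∧ j < J)) then pvD2 m n moves.toNat i j
    else 0

lemma pvCellStep_grid (m n k : Int) (hm : 1 ≤ m) (hn : 1 ≤ n) (moves I J : Int)
    (hmv : 1 ≤ moves) (hmv' : moves ≤ k) (hI : 0 ≤ I) (hI' : I < m) (hJ : 0 ≤ J) (hJ' : J < n) :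
    pvCellStep m n moves I J (pvGrid m n k (pvGP m n moves I J)) =
      pvGrid m n k (pvGP m n moves I (J + 1)) := by
  unfold pvCellStep pvDirs
  simp only [List.foldl_cons, List.foldl_nil]
  rw [pvDirStep_grid m n k moves I J 0 1 _ hI hI' hJ hJ' hmv hmv']
  rw [pvDirStep_grid m n k moves I J 1 0 _ hI hI' hJ hJ' hmv hmv']
  rw [pvDirStep_grid m n k moves I J 0 (-1) _ hI hI' hJ hJ' hmv hmv']
  rw [pvDirStep_grid m n k moves I J (-1) 0 _ hI hI' hJ hJ' hmv hmv']
  rw [show I + (0 : Int) = I from by ring, show J + (0 : Int) = J from by ring,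
    show I + (-1 : Int) = I - 1 from by ring, show J + (-1 : Int) = J - 1 from by ring]
  apply pvGrid_congr
  intro i j t hi hi' hj hj' ht ht'
  beta_reduce
  by_cases hcell : i = I ∧ j = J ∧ t = moves
  · obtain ⟨hci, hcj, hct⟩ := hcell
    rw [hci, hcj, hct]
    have hmm1 : ¬ (moves - 1 = moves) := by omega
    simp only [hmm1, and_false, if_false, and_self, if_true]
    have hGP0 : pvGP m n moves I J I J moves = 0 := by
      unfold pvGP
      rw [if_neg (by omega), if_neg (by rintro ⟨-, h2 | ⟨-, h3⟩⟩ <;> omega)]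
    have hlayer : ∀ x y : Int, pvGP m n moves I J x y (moves - 1) =
        pvD2 m n (moves - 1).toNat x y := by
      intro x y
      unfold pvGP
      rw [if_pos (by omega)]
    have hGPnew : pvGP m n moves I (J + 1) I J moves = pvD2 m n moves.toNat I J := by
      unfold pvGP
      rw [if_neg (by omega), if_pos ⟨rfl, Or.inr ⟨rfl, by omega⟩⟩]
    have hMv : moves.toNat = (moves - 1).toNat + 1 := by omega
    have hD : pvD2 m n moves.toNat I J =
        pvD2 m n (moves - 1).toNat I (J + 1) + pvD2 m n (moves - 1).toNat (I + 1) J +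
        pvD2 m n (moves - 1).toNat I (J - 1) + pvD2 m n (moves - 1).toNat (I - 1) J := by
      rw [hMv]
      simp only [pvD2]
      rw [if_pos (show 0 ≤ I ∧ I < m ∧ 0 ≤ J ∧ J < n from ⟨hI, hI', hJ, hJ'⟩)]
    rw [hGPnew, hD, hGP0]
    simp only [hlayer]
    by_cases c1 : 0 ≤ I ∧ I < m ∧ 0 ≤ J + 1 ∧ J + 1 < n
    all_goals by_cases c2 : 0 ≤ I + 1 ∧ I + 1 < m ∧ 0 ≤ J ∧ J < n
    all_goals by_cases c3 : 0 ≤ I ∧ I < m ∧ 0 ≤ J - 1 ∧ J - 1 < n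
    all_goals by_cases c4 : 0 ≤ I - 1 ∧ I - 1 < m ∧ 0 ≤ J ∧ J < n
    all_goals first
      | (rw [if_pos c1]) | (rw [if_neg c1, pvD2_outside m n hm hn _ I (J + 1) c1])
    all_goals first
      | (rw [if_pos c2]) | (rw [if_neg c2, pvD2_outside m n hm hn _ (I + 1) J c2])
    all_goals first
      | (rw [if_pos c3]) | (rw [if_neg c3, pvD2_outside m n hm hn _ I (J - 1) c3])
    all_goals first
      | (rw [if_pos c4]) | (rw [if_neg c4, pvD2_outside m n hm hn _ (I - 1) J c4])
    all_goals ring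
  · simp only [if_neg hcell]
    unfold pvGP
    by_cases h1 : t < moves
    · rw [if_pos h1, if_pos h1]
    · rw [if_neg h1, if_neg h1]
      by_cases h2 : t = moves ∧ (i < I ∨ (i = I ∧ j < J))
      · rw [if_pos h2, if_pos (show t = moves ∧ (i < I ∨ (i = I ∧ j < J + 1)) from
          ⟨h2.1, by rcases h2.2 with h | h; exact Or.inl h; exact Or.inr ⟨h.1, by omega⟩⟩)]
      · by_cases h3 : t = moves ∧ (i < I ∨ (i = I ∧ j < J + 1))
        · exfalso
          rcases h3.2 with h | h
          · exact h2 ⟨h3.1, Or.inl h⟩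
          · have hji : j = J := by omega
            exact hcell ⟨h.1, hji, h3.1⟩
        · rw [if_neg h2, if_neg h3]

lemma pvJloopAux (m n k : Int) (hm : 1 ≤ m) (hn : 1 ≤ n) (moves I : Int)
    (hmv : 1 ≤ moves) (hmv' : moves ≤ k) (hI : 0 ≤ I) (hI' : I < m) :
    ∀ J : Nat, (J : Int) ≤ n →
      (PySem.List.pyRange 0 (J : Int) 1).foldl (fun dp j => pvCellStep m n moves I j dp)
          (pvGrid m n k (pvGP m n moves I 0)) =
        pvGrid m n k (pvGP m n moves I (J : Int)) := by
  intro J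
  induction J with
  | zero =>
    intro _
    rw [PySem.List.pyRange_one_eq_nil (show ((0 : Nat) : Int) ≤ (0 : Int) by simp)]
    rfl
  | succ J ih =>
    intro hJn
    have hJ : (J : Int) ≤ n := by push_cast at hJn ⊢; omega
    rw [show ((J + 1 : Nat) : Int) = (J : Int) + 1 from by push_cast; ring]
    rw [PySem.List.pyRange_one_succ_right (show (0 : Int) ≤ (J : Int) by omega),
      List.foldl_append, ih hJ]
    simp only [List.foldl_cons, List.foldl_nil]
    exact pvCellStep_grid m n k hm hn moves I J hmv hmv' hI hI' (by omega) (by push_cast at hJn; omega)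

lemma pvJloop (m n k : Int) (hm : 1 ≤ m) (hn : 1 ≤ n) (moves I : Int)
    (hmv : 1 ≤ moves) (hmv' : moves ≤ k) (hI : 0 ≤ I) (hI' : I < m) :
    (PySem.List.pyRange 0 n 1).foldl (fun dp j => pvCellStep m n moves I j dp)
        (pvGrid m n k (pvGP m n moves I 0)) =
      pvGrid m n k (pvGP m n moves (I + 1) 0) := by
  have e := pvJloopAux m n k hm hn moves I hmv hmv' hI hI' n.toNat (by omega)
  rw [show ((n.toNat : Nat) : Int) = n from by omega] at e
  rw [e]
  apply pvGrid_congr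
  intro i j t _ _ hj hj' _ _
  unfold pvGP
  by_cases h1 : t < moves
  · rw [if_pos h1, if_pos h1]
  · rw [if_neg h1, if_neg h1]
    by_cases h2 : t = moves ∧ (i < I ∨ (i = I ∧ j < n))
    · rw [if_pos h2, if_pos (show t = moves ∧ (i < I + 1 ∨ (i = I + 1 ∧ j < 0)) from
        ⟨h2.1, Or.inl (by rcases h2.2 with h | h <;> omega)⟩)]
    · rw [if_neg h2, if_neg (by
        rintro ⟨h3a, h3b | h3b⟩
        · by_cases hiI : i = I
          · exact h2 ⟨h3a, Or.inr ⟨hiI, hj'⟩⟩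
          · exact h2 ⟨h3a, Or.inl (by omega)⟩
        · omega)]

lemma pvIloopAux (m n k : Int) (hm : 1 ≤ m) (hn : 1 ≤ n) (moves : Int)
    (hmv : 1 ≤ moves) (hmv' : moves ≤ k) :
    ∀ I : Nat, (I : Int) ≤ m →
      (PySem.List.pyRange 0 (I : Int) 1).foldl (fun dp i =>
          (PySem.List.pyRange 0 n 1).foldl (fun dp j => pvCellStep m n moves i j dp) dp)
          (pvGrid m n k (pvGP m n moves 0 0)) =
        pvGrid m n k (pvGP m n moves (I : Int) 0) := by
  intro I
  induction I with
  | zero =>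
    intro _
    rw [PySem.List.pyRange_one_eq_nil (show ((0 : Nat) : Int) ≤ (0 : Int) by simp)]
    rfl
  | succ I ih =>
    intro hIm
    have hI : (I : Int) ≤ m := by push_cast at hIm ⊢; omega
    rw [show ((I + 1 : Nat) : Int) = (I : Int) + 1 from by push_cast; ring]
    rw [PySem.List.pyRange_one_succ_right (show (0 : Int) ≤ (I : Int) by omega),
      List.foldl_append, ih hI]
    simp only [List.foldl_cons, List.foldl_nil]
    exact pvJloop m n k hm hn moves I hmv hmv' (by omega) (by push_cast at hIm; omega)

def pvCut (m n : Int) (M : Int) : Int → Int → Int → Int :=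
  fun i j t => if t < M then pvD2 m n t.toNat i j else 0

lemma pvCut_eq_GP0 (m n k moves : Int) (hmv : 1 ≤ moves) :
    pvGrid m n k (pvCut m n moves) = pvGrid m n k (pvGP m n moves 0 0) := by
  apply pvGrid_congr
  intro i j t hi _ hj _ _ _
  unfold pvCut pvGP
  by_cases h1 : t < moves
  · rw [if_pos h1, if_pos h1]
  · rw [if_neg h1, if_neg h1, if_neg (by rintro ⟨-, h2 | ⟨-, h3⟩⟩ <;> omega)]

lemma pvGPm_eq_cut (m n k moves : Int) (hm : 1 ≤ m) (hn : 1 ≤ n) (hmv : 1 ≤ moves) :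
    pvGrid m n k (pvGP m n moves m 0) = pvGrid m n k (pvCut m n (moves + 1)) := by
  apply pvGrid_congr
  intro i j t hi hi' hj _ ht _
  unfold pvCut pvGP
  by_cases h1 : t < moves
  · rw [if_pos h1, if_pos (by omega)]
  · rw [if_neg h1]
    by_cases h2 : t = moves
    · rw [if_pos (show t = moves ∧ (i < m ∨ (i = m ∧ j < 0)) from ⟨h2, Or.inl (by omega)⟩),
        if_pos (by omega), h2]
    · rw [if_neg (by tauto), if_neg (by omega)]

lemma pvMovesLoopAux (m n k : Int) (hm : 1 ≤ m) (hn : 1 ≤ n) (hk : 0 ≤ k) :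
    ∀ M : Nat, (M : Int) ≤ k →
      (PySem.List.pyRange 1 (1 + (M : Int)) 1).foldl (fun dp moves =>
          (PySem.List.pyRange 0 m 1).foldl (fun dp i =>
            (PySem.List.pyRange 0 n 1).foldl (fun dp j => pvCellStep m n moves i j dp) dp) dp)
          (pvGrid m n k (pvCut m n 1)) =
        pvGrid m n k (pvCut m n (1 + (M : Int))) := by
  intro M
  induction M with
  | zero =>
    intro _
    rw [PySem.List.pyRange_one_eq_nil (show (1 : Int) + ((0 : Nat) : Int) ≤ (1 : Int) by simp)]
    rfl
  | succ M ih =>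
    intro hMk
    have hM : (M : Int) ≤ k := by push_cast at hMk ⊢; omega
    rw [show (1 : Int) + ((M + 1 : Nat) : Int) = (1 + (M : Int)) + 1 from by push_cast; ring]
    rw [PySem.List.pyRange_one_succ_right (show (1 : Int) ≤ 1 + (M : Int) by omega),
      List.foldl_append, ih hM]
    simp only [List.foldl_cons, List.foldl_nil]
    have hmv : (1 : Int) ≤ 1 + (M : Int) := by omega
    have hmv' : 1 + (M : Int) ≤ k := by push_cast at hMk; omega
    rw [pvCut_eq_GP0 m n k (1 + (M : Int)) hmv]
    have e := pvIloopAux m n k hm hn (1 + (M : Int)) hmv hmv' m.toNat (by omega)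
    rw [show ((m.toNat : Nat) : Int) = m from by omega] at e
    rw [e, pvGPm_eq_cut m n k (1 + (M : Int)) hm hn hmv]

lemma pvFoldAddSum (c : Int) (F : Int → Int) : ∀ s : Int,
    (PySem.List.pyRange 0 c 1).foldl (fun s x => s + F x) s =
      s + ∑ x ∈ Finset.range c.toNat, F (x : Int) := by
  rcases le_or_gt c 0 with hc | hc
  · intro s
    rw [PySem.List.pyRange_one_eq_nil (show c ≤ (0 : Int) from hc)]
    rw [show c.toNat = 0 from by omega]
    simp
  · have hrepr : c = ((c.toNat : Nat) : Int) := by omega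
    rw [hrepr]
    generalize c.toNat = N
    induction N with
    | zero =>
      intro s
      rw [PySem.List.pyRange_one_eq_nil (show ((0 : Nat) : Int) ≤ (0 : Int) by simp)]
      simp
    | succ N ih =>
      intro s
      rw [show ((N + 1 : Nat) : Int) = (N : Int) + 1 from by push_cast; ring]
      rw [PySem.List.pyRange_one_succ_right (show (0 : Int) ≤ (N : Int) by omega),
        List.foldl_append, ih]
      simp only [List.foldl_cons, List.foldl_nil, Int.toNat_natCast]
      rw [show ((N : Int) + 1).toNat = N + 1 from by omega, Finset.sum_range_succ]
      ring

lemma pvA_eq_sum (m n k : Int) (hm : 1 ≤ m) (hn : 1 ≤ n) (hk : 0 ≤ k) :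
    unique_paths_k_moves m n k =
      ∑ i ∈ Finset.range m.toNat, ∑ j ∈ Finset.range n.toNat,
        pvD2 m n k.toNat (i : Int) (j : Int) := by
  rw [unique_paths_k_moves]
  have e0 : ((PySem.List.pyRange 0 m 1).map (fun _ =>
      (PySem.List.pyRange 0 n 1).map (fun _ =>
        (PySem.List.pyRange 0 (k + 1) 1).map (fun _ => (0 : Int))))) =
      pvGrid m n k (fun _ _ _ => (0 : Int)) := rfl
  rw [e0]
  have e1 : pvMod3 (pvGrid m n k (fun _ _ _ => (0 : Int))) 0 0 0 (fun _ => 1) =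
      pvGrid m n k (pvCut m n 1) := by
    rw [pvMod3_grid m n k _ 0 0 0 _ le_rfl (by omega) le_rfl (by omega) le_rfl (by omega)]
    apply pvGrid_congr
    intro i j t hi _ hj _ ht _
    unfold pvCut
    by_cases h : i = 0 ∧ j = 0 ∧ t = 0
    · rw [if_pos h, if_pos (by omega)]
      obtain ⟨rfl, rfl, rfl⟩ := h
      simp [pvD2]
    · rw [if_neg h]
      by_cases h2 : t < 1
      · rw [if_pos h2]
        have ht0 : t = 0 := by omega
        subst ht0
        simp only [Int.toNat_zero, pvD2]
        rw [if_neg (by tauto)]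
      · rw [if_neg h2]
  rw [e1]
  have e2 := pvMovesLoopAux m n k hm hn hk k.toNat (by omega)
  rw [show (1 : Int) + ((k.toNat : Nat) : Int) = k + 1 from by omega] at e2
  rw [e2]
  simp only [pvFoldAddSum, zero_add]
  refine Finset.sum_congr rfl (fun i hi => Finset.sum_congr rfl (fun j hj => ?_))
  rw [Finset.mem_range] at hi hj
  rw [pvGet3_grid m n k _ (i : Int) (j : Int) k (by omega) (by omega) (by omega) (by omega) hk
    (by omega)]
  unfold pvCut
  rw [if_pos (by omega)]

-- ----- bridge to port B -----

def pvG1 (L : Int) (a : Nat) : Int :=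
  ((PySem.List.pyRange 0 L 1).map (fun i => pvF L a i)).sum

lemma pvG1_zero (L : Int) (hL : 1 ≤ L) : pvG1 L 0 = 1 := by
  unfold pvG1
  rw [PySem.List.pyRange_one_cons (show (0 : Int) < L from by omega)]
  simp only [List.map_cons, List.sum_cons]
  have h0 : ((PySem.List.pyRange (0 + 1) L 1).map (fun i => pvF L 0 i)).sum = 0 := by
    apply List.sum_eq_zero
    intro x hx
    rw [List.mem_map] at hx
    obtain ⟨i, hi, rfl⟩ := hx
    rw [PySem.List.mem_pyRange_one] at hi
    simp only [pvF]
    rw [if_neg (by omega)]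
  rw [h0]
  simp [pvF]

lemma pvStep_map (L : Int) (hL : 1 ≤ L) (s : Nat) :
    pvStep L ((PySem.List.pyRange 0 L 1).map (fun i => pvF L s i)) =
      (PySem.List.pyRange 0 L 1).map (fun i => pvF L (s + 1) i) := by
  unfold pvStep
  refine List.map_congr_left (fun i hi => ?_)
  rw [PySem.List.mem_pyRange_one] at hi
  rw [pvF_inside L s i ⟨hi.1, hi.2⟩]
  congr 1
  · by_cases h : 0 < i
    · rw [if_pos h, PySem.List.pyGetD_map_pyRange_of_nonneg _ L (i - 1) _ (by omega) (by omega)]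
    · rw [if_neg h, pvF_outside L hL s (i - 1) (by omega)]
  · by_cases h : i + 1 < L
    · rw [if_pos h, PySem.List.pyGetD_map_pyRange_of_nonneg _ L (i + 1) _ (by omega) h]
    · rw [if_neg h, pvF_outside L hL s (i + 1) (by omega)]

lemma pvCur0_eq (L : Int) (hL : 1 ≤ L) :
    (List.replicate L.toNat (0 : Int)).set 0 1 =
      (PySem.List.pyRange 0 L 1).map (fun i => pvF L 0 i) := by
  apply List.ext_getElem
  · simp [PySem.List.length_pyRange_one]
  intro p h1 h2
  rw [List.getElem_set]
  simp only [List.getElem_map, PySem.List.getElem_pyRange_one, List.getElem_replicate]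
  simp only [pvF]
  split_ifs <;> first | rfl | omega

lemma pvTotalsAux (L : Int) (hL : 1 ≤ L) : ∀ s : Nat,
    (PySem.List.pyRange 0 (s : Int) 1).foldl
        (fun (st : List Int × List Int) _ =>
          (pvStep L st.1, st.2 ++ [(pvStep L st.1).sum]))
        ((List.replicate L.toNat (0 : Int)).set 0 1, [1]) =
      ((PySem.List.pyRange 0 L 1).map (fun i => pvF L s i),
        (List.range (s + 1)).map (fun a => pvG1 L a)) := by
  intro s
  induction s with
  | zero =>
    rw [PySem.List.pyRange_one_eq_nil (show ((0 : Nat) : Int) ≤ (0 : Int) by simp)]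
    simp only [List.foldl_nil]
    rw [pvCur0_eq L hL]
    refine Prod.ext rfl ?_
    simp [pvG1_zero L hL]
  | succ s ih =>
    rw [show ((s + 1 : Nat) : Int) = (s : Int) + 1 from by push_cast; ring]
    rw [PySem.List.pyRange_one_succ_right (show (0 : Int) ≤ (s : Int) by omega),
      List.foldl_append, ih]
    simp only [List.foldl_cons, List.foldl_nil]
    rw [pvStep_map L hL s]
    refine Prod.ext rfl ?_
    simp only []
    rw [List.range_succ (n := s + 1), List.map_append]
    rfl

lemma pvTotals_eq (L t : Int) (hL : 1 ≤ L) (ht : 0 ≤ t) :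
    pvTotals L t = (List.range (t.toNat + 1)).map (fun a => pvG1 L a) := by
  rw [pvTotals]
  have hrepr : t = ((t.toNat : Nat) : Int) := by omega
  rw [hrepr, pvTotalsAux L hL t.toNat]
  rw [show (((t.toNat : Nat) : Int)).toNat = t.toNat from by omega]

lemma pvG1_eq_sum (L : Int) (a : Nat) :
    pvG1 L a = ∑ x ∈ Finset.range L.toNat, pvF L a (x : Int) := by
  unfold pvG1
  rw [PySem.List.pyRange_one 0 L, List.map_map]
  rw [show (L - 0).toNat = L.toNat from by omega]
  rw [pvListSumRange]
  apply Finset.sum_congr rfl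
  intro x _
  simp

lemma pvBFoldAux (m n k : Int) (hm : 1 ≤ m) (hn : 1 ≤ n) (hk : 0 ≤ k) : ∀ a : Nat, a ≤ k.toNat + 1 →
    (PySem.List.pyRange 0 (a : Int) 1).foldl
        (fun (st : Int × Int) x =>
          (st.1 + st.2 * PySem.List.pyGetD ((List.range (k.toNat + 1)).map (fun b => pvG1 m b)) x 0 *
              PySem.List.pyGetD ((List.range (k.toNat + 1)).map (fun b => pvG1 n b)) (k - x) 0,
            PySem.Int.floordiv (st.2 * (k - x)) (x + 1)))
        (0, 1) =
      (∑ b ∈ Finset.range a, ((k.toNat.choose b : Int) * pvG1 m b * pvG1 n (k.toNat - b)),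
        (k.toNat.choose a : Int)) := by
  intro a
  induction a with
  | zero =>
    intro _
    rw [PySem.List.pyRange_one_eq_nil (show ((0 : Nat) : Int) ≤ (0 : Int) by simp)]
    simp
  | succ a ih =>
    intro ha
    have ha' : a ≤ k.toNat := by omega
    rw [show ((a + 1 : Nat) : Int) = (a : Int) + 1 from by push_cast; ring]
    rw [PySem.List.pyRange_one_succ_right (show (0 : Int) ≤ (a : Int) by omega),
      List.foldl_append, ih (by omega)]
    simp only [List.foldl_cons, List.foldl_nil]
    have hrow : PySem.List.pyGetD ((List.range (k.toNat + 1)).map (fun b => pvG1 m b)) ((a : Nat) : Int) 0 =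
        pvG1 m a := by
      rw [PySem.List.pyGetD_natCast, List.getD_eq_getElem?_getD, List.getElem?_map,
        List.getElem?_range (by omega)]
      rfl
    have hcol : PySem.List.pyGetD ((List.range (k.toNat + 1)).map (fun b => pvG1 n b)) (k - (a : Int)) 0 =
        pvG1 n (k.toNat - a) := by
      rw [show k - ((a : Nat) : Int) = ((k.toNat - a : Nat) : Int) from by omega]
      rw [PySem.List.pyGetD_natCast, List.getD_eq_getElem?_getD, List.getElem?_map,
        List.getElem?_range (by omega)]
      rfl
    have hc : PySem.Int.floordiv ((k.toNat.choose a : Int) * (k - (a : Int))) ((a : Int) + 1) =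
        (k.toNat.choose (a + 1) : Int) := by
      rw [show k - ((a : Nat) : Int) = ((k.toNat - a : Nat) : Int) from by omega]
      rw [show (((a : Nat) : Int) + 1) = (((a + 1 : Nat) : Nat) : Int) from by push_cast; ring]
      rw [show ((k.toNat.choose a : Int)) * (((k.toNat - a : Nat) : Nat) : Int) =
          ((k.toNat.choose a * (k.toNat - a) : Nat) : Int) from by push_cast; ring]
      rw [PySem.Int.floordiv_natCast]
      congr 1
      rw [← Nat.choose_succ_right_eq]
      exact Nat.mul_div_cancel _ (by omega)
    rw [hrow, hcol, hc, Finset.sum_range_succ]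

lemma pvB_eq_sum (m n k : Int) (hm : 1 ≤ m) (hn : 1 ≤ n) (hk : 0 ≤ k) :
    unique_paths_k_moves_alt m n k =
      ∑ a ∈ Finset.range (k.toNat + 1),
        ((k.toNat.choose a : Int) * pvG1 m a * pvG1 n (k.toNat - a)) := by
  rw [unique_paths_k_moves_alt]
  rw [pvTotals_eq m k hm hk, pvTotals_eq n k hn hk]
  have e := pvBFoldAux m n k hm hn hk (k.toNat + 1) le_rfl
  rw [show (((k.toNat + 1 : Nat)) : Int) = k + 1 from by omega] at e
  rw [e]

-- ===== VERDICT (by name: the statement is the Claim_ definition above) =====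
theorem unique_paths_k_moves_spec : Claim_equal_unique_paths_k_moves := by
  intro m n k _ hpre
  obtain ⟨hm, hn, hk⟩ := hpre
  unfold Spec_unique_paths_k_moves
  rw [pvA_eq_sum m n k hm hn hk, pvB_eq_sum m n k hm hn hk]
  calc ∑ i ∈ Finset.range m.toNat, ∑ j ∈ Finset.range n.toNat, pvD2 m n k.toNat (i : Int) (j : Int)
      = ∑ i ∈ Finset.range m.toNat, ∑ j ∈ Finset.range n.toNat,
          ∑ a ∈ Finset.range (k.toNat + 1),
            ((k.toNat.choose a : Int) * pvF m a (i : Int) * pvF n (k.toNat - a) (j : Int)) := by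
        refine Finset.sum_congr rfl (fun i _ => Finset.sum_congr rfl (fun j _ => ?_))
        exact pvD2_eq_conv m n hm hn k.toNat i j
    _ = ∑ a ∈ Finset.range (k.toNat + 1), ∑ i ∈ Finset.range m.toNat,
          ∑ j ∈ Finset.range n.toNat,
            ((k.toNat.choose a : Int) * pvF m a (i : Int) * pvF n (k.toNat - a) (j : Int)) := by
        rw [Finset.sum_congr rfl (fun i _ => Finset.sum_comm), Finset.sum_comm]
    _ = ∑ a ∈ Finset.range (k.toNat + 1),
          ((k.toNat.choose a : Int) * pvG1 m a * pvG1 n (k.toNat - a)) := by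
        refine Finset.sum_congr rfl (fun a _ => ?_)
        rw [pvG1_eq_sum m a, pvG1_eq_sum n (k.toNat - a)]
        have h1 : ∀ i ∈ Finset.range m.toNat,
            (∑ j ∈ Finset.range n.toNat,
              ((k.toNat.choose a : Int) * pvF m a (i : Int) * pvF n (k.toNat - a) (j : Int))) =
            ((k.toNat.choose a : Int) * pvF m a (i : Int)) *
              ∑ j ∈ Finset.range n.toNat, pvF n (k.toNat - a) (j : Int) := by
          intro i _
          rw [Finset.mul_sum]
        rw [Finset.sum_congr rfl h1, ← Finset.sum_mul, ← Finset.mul_sum]
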